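-- pv_equiv track=rewrite | github.com/rajshah4/dash | dash/scripts/check_schema.py | _types_match
-- ===== SOURCE A (Python) =====
-- def _types_match(known: str, live: str) -> bool:
--     """Fuzzy-match column types between knowledge and live schema."""
--     # Normalize common type aliases
--     aliases: dict[str, set[str]] = {
--         "int": {"integer", "bigint", "int4", "int8", "smallint", "int"},
--         "text": {"text", "varchar", "character varying", "char"},
--         "float": {"float", "double precision", "real", "numeric", "decimal", "float8", "float4"},
--         "bool": {"boolean", "bool"},
--         "date": {"date"},
--         "timestamp": {"timestamp", "timestamp without time zone", "timestamp with time zone", "timestamptz"},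
--     }
--     for _canonical, variants in aliases.items():
--         if known in variants and live in variants:
--             return True
--     # Exact match as fallback
--     return known == live
-- ===== SOURCE B (Python) =====
-- # Normalize each type string to a canonical name, then compare the normal forms.
-- _CANONICAL = {
--     "integer": "int", "bigint": "int", "int4": "int", "int8": "int",
--     "smallint": "int", "int": "int",
--     "text": "text", "varchar": "text", "character varying": "text", "char": "text",
--     "float": "float", "double precision": "float", "real": "float",
--     "numeric": "float", "decimal": "float", "float8": "float", "float4": "float",
--     "boolean": "bool", "bool": "bool",
--     "date": "date",
--     "timestamp": "timestamp", "timestamp without time zone": "timestamp",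
--     "timestamp with time zone": "timestamp", "timestamptz": "timestamp",
-- }
--
--
-- def _canon(t: str) -> str:
--     """Canonical form of a type name; unknown types are their own canonical form."""
--     return _CANONICAL.get(t, t)
--
--
-- def _types_match(known: str, live: str) -> bool:
--     """Fuzzy-match column types between knowledge and live schema."""
--     return _canon(known) == _canon(live)
-- ===== Notes on version B (the rewrite author's own statement) =====
-- stated objective: simpler
-- what changed: B replaces A's per-call scan over sets of aliases with a normalize-then-compare scheme: a flat alias-to-canonical table, each argument is mapped to its canonical form (itself if unknown), and the results are compared once; this subsumes A's known == live fallback because unknown strings are their own canonical form and canonical names are never unknown aliases.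
import Mathlib
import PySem

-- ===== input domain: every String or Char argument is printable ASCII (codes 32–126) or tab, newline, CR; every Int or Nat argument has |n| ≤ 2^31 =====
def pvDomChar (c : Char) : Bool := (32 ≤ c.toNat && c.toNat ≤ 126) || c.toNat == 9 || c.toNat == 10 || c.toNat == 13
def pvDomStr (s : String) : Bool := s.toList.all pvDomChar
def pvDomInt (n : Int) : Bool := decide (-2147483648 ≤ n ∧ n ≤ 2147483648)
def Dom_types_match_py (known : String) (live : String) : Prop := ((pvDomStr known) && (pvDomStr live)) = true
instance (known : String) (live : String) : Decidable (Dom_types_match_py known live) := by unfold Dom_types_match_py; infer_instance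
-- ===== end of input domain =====

-- B normalizes each type name to its canonical form via one flat alias→canonical table and
-- compares the normal forms, instead of A's per-call scan over sets of aliases with an
-- equality fallback (objective: simpler; same observable results).


-- ===== PORT A =====
-- A's literal alias table: dict canonical → set of variants
def pvAliasesA : PySem.Dict String (PySem.Set String) :=
  PySem.Dict.ofList
    [ ("int", PySem.Set.ofList ["integer", "bigint", "int4", "int8", "smallint", "int"])
    , ("text", PySem.Set.ofList ["text", "varchar", "character varying", "char"])
    , ("float", PySem.Set.ofList ["float", "double precision", "real", "numeric", "decimal", "float8", "float4"])
    , ("bool", PySem.Set.ofList ["boolean", "bool"])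
    , ("date", PySem.Set.ofList ["date"])
    , ("timestamp", PySem.Set.ofList ["timestamp", "timestamp without time zone", "timestamp with time zone", "timestamptz"]) ]

-- A's for-loop over aliases.items() with early return, then the known == live fallback
def pvLoopA (known live : String) : List (String × PySem.Set String) → Bool
  | [] => known == live
  | (_, variants) :: rest =>
      if PySem.Set.contains variants known && PySem.Set.contains variants live then true
      else pvLoopA known live rest

def types_match_py (known : String) (live : String) : Bool :=
  pvLoopA known live pvAliasesA.items

-- ===== PORT B =====
-- B's flat table: alias → canonical name (the Python dict literal _CANONICAL)
def pvCanonTable : PySem.Dict String String :=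
  PySem.Dict.ofList
    [ ("integer", "int"), ("bigint", "int"), ("int4", "int"), ("int8", "int")
    , ("smallint", "int"), ("int", "int")
    , ("text", "text"), ("varchar", "text"), ("character varying", "text"), ("char", "text")
    , ("float", "float"), ("double precision", "float"), ("real", "float")
    , ("numeric", "float"), ("decimal", "float"), ("float8", "float"), ("float4", "float")
    , ("boolean", "bool"), ("bool", "bool")
    , ("date", "date")
    , ("timestamp", "timestamp"), ("timestamp without time zone", "timestamp")
    , ("timestamp with time zone", "timestamp"), ("timestamptz", "timestamp") ]

-- _canon: canonical form of a type name; unknown types are their own canonical form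
def pvCanon (t : String) : String := pvCanonTable.getD t t

def types_match_py_alt (known : String) (live : String) : Bool :=
  pvCanon known == pvCanon live

-- ===== PRECONDITION & SPEC =====
def Spec_types_match_py (known : String) (live : String) (out : Bool) : Prop := out = types_match_py_alt known live
instance (known : String) (live : String) (out : Bool) : Decidable (Spec_types_match_py known live out) := by unfold Spec_types_match_py; infer_instance

-- ===== CLAIM (what is proved, stated in full; the proofs are below) =====
def Claim_equal_types_match_py : Prop := ∀ (known : String) (live : String), Dom_types_match_py known live → Spec_types_match_py known live (types_match_py known live)

-- ===== LEMMAS AND PROOFS =====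

theorem pvCanonTable_eq : pvCanonTable = PySem.Dict.mk
    [ ("integer", "int"), ("bigint", "int"), ("int4", "int"), ("int8", "int")
    , ("smallint", "int"), ("int", "int")
    , ("text", "text"), ("varchar", "text"), ("character varying", "text"), ("char", "text")
    , ("float", "float"), ("double precision", "float"), ("real", "float")
    , ("numeric", "float"), ("decimal", "float"), ("float8", "float"), ("float4", "float")
    , ("boolean", "bool"), ("bool", "bool")
    , ("date", "date")
    , ("timestamp", "timestamp"), ("timestamp without time zone", "timestamp")
    , ("timestamp with time zone", "timestamp"), ("timestamptz", "timestamp") ] := by rfl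

theorem pvAliasesA_eq : pvAliasesA = PySem.Dict.mk
    [ ("int", PySem.Set.ofList ["integer", "bigint", "int4", "int8", "smallint", "int"])
    , ("text", PySem.Set.ofList ["text", "varchar", "character varying", "char"])
    , ("float", PySem.Set.ofList ["float", "double precision", "real", "numeric", "decimal", "float8", "float4"])
    , ("bool", PySem.Set.ofList ["boolean", "bool"])
    , ("date", PySem.Set.ofList ["date"])
    , ("timestamp", PySem.Set.ofList ["timestamp", "timestamp without time zone", "timestamp with time zone", "timestamptz"]) ] := by rfl

-- Every string is either no alias at all (its own canonical form, in no variant set and not a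
-- canonical name) or an alias of exactly one canonical group g.
theorem pv_classify (s : String) :
    (pvCanon s = s
      ∧ (∀ p ∈ pvAliasesA.items, PySem.Set.contains p.2 s = false)
      ∧ s ∉ pvAliasesA.keys)
    ∨ (∃ g, pvCanon s = g ∧ g ∈ pvAliasesA.keys
      ∧ (∀ p ∈ pvAliasesA.items, PySem.Set.contains p.2 s = (p.1 == g))) := by
  by_cases h0 : s = "integer"
  · subst h0; right; exact ⟨"int", by decide⟩
  by_cases h1 : s = "bigint"
  · subst h1; right; exact ⟨"int", by decide⟩
  by_cases h2 : s = "int4"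
  · subst h2; right; exact ⟨"int", by decide⟩
  by_cases h3 : s = "int8"
  · subst h3; right; exact ⟨"int", by decide⟩
  by_cases h4 : s = "smallint"
  · subst h4; right; exact ⟨"int", by decide⟩
  by_cases h5 : s = "int"
  · subst h5; right; exact ⟨"int", by decide⟩
  by_cases h6 : s = "text"
  · subst h6; right; exact ⟨"text", by decide⟩
  by_cases h7 : s = "varchar"
  · subst h7; right; exact ⟨"text", by decide⟩
  by_cases h8 : s = "character varying"
  · subst h8; right; exact ⟨"text", by decide⟩
  by_cases h9 : s = "char"
  · subst h9; right; exact ⟨"text", by decide⟩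
  by_cases h10 : s = "float"
  · subst h10; right; exact ⟨"float", by decide⟩
  by_cases h11 : s = "double precision"
  · subst h11; right; exact ⟨"float", by decide⟩
  by_cases h12 : s = "real"
  · subst h12; right; exact ⟨"float", by decide⟩
  by_cases h13 : s = "numeric"
  · subst h13; right; exact ⟨"float", by decide⟩
  by_cases h14 : s = "decimal"
  · subst h14; right; exact ⟨"float", by decide⟩
  by_cases h15 : s = "float8"
  · subst h15; right; exact ⟨"float", by decide⟩
  by_cases h16 : s = "float4"
  · subst h16; right; exact ⟨"float", by decide⟩
  by_cases h17 : s = "boolean"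
  · subst h17; right; exact ⟨"bool", by decide⟩
  by_cases h18 : s = "bool"
  · subst h18; right; exact ⟨"bool", by decide⟩
  by_cases h19 : s = "date"
  · subst h19; right; exact ⟨"date", by decide⟩
  by_cases h20 : s = "timestamp"
  · subst h20; right; exact ⟨"timestamp", by decide⟩
  by_cases h21 : s = "timestamp without time zone"
  · subst h21; right; exact ⟨"timestamp", by decide⟩
  by_cases h22 : s = "timestamp with time zone"
  · subst h22; right; exact ⟨"timestamp", by decide⟩
  by_cases h23 : s = "timestamptz"
  · subst h23; right; exact ⟨"timestamp", by decide⟩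
  left
  refine ⟨?_, ?_, ?_⟩
  · simp [pvCanon, pvCanonTable_eq, PySem.Dict.getD, PySem.Dict.get?, Ne.symm h0, Ne.symm h1, Ne.symm h2, Ne.symm h3, Ne.symm h4, Ne.symm h5, Ne.symm h6, Ne.symm h7, Ne.symm h8, Ne.symm h9, Ne.symm h10, Ne.symm h11, Ne.symm h12, Ne.symm h13, Ne.symm h14, Ne.symm h15, Ne.symm h16, Ne.symm h17, Ne.symm h18, Ne.symm h19, Ne.symm h20, Ne.symm h21, Ne.symm h22, Ne.symm h23]
  · intro p hp
    fin_cases hp <;> simp [PySem.Set.contains, h0, h1, h2, h3, h4, h5, h6, h7, h8, h9, h10, h11, h12, h13, h14, h15, h16, h17, h18, h19, h20, h21, h22, h23]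
  · simp [pvAliasesA_eq, h5, h6, h10, h18, h19, h20]

theorem pvLoopA_all_false (known live : String) (l : List (String × PySem.Set String))
    (h : ∀ p ∈ l, (PySem.Set.contains p.2 known && PySem.Set.contains p.2 live) = false) :
    pvLoopA known live l = (known == live) := by
  induction l with
  | nil => rfl
  | cons p rest ih =>
    simp only [pvLoopA, h p (by simp)]
    exact ih fun q hq => h q (by simp [hq])

theorem pvLoopA_hit (known live : String) (l : List (String × PySem.Set String))
    (h : ∃ p ∈ l, (PySem.Set.contains p.2 known && PySem.Set.contains p.2 live) = true) :
    pvLoopA known live l = true := by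
  induction l with
  | nil => simp at h
  | cons p rest ih =>
    obtain ⟨q, hq, hcond⟩ := h
    by_cases hp : (PySem.Set.contains p.2 known && PySem.Set.contains p.2 live) = true
    · simp only [pvLoopA]; rw [if_pos hp]
    · simp only [pvLoopA]; rw [if_neg hp]
      rcases List.mem_cons.mp hq with rfl | hq'
      · exact absurd hcond hp
      · exact ih ⟨q, hq', hcond⟩

theorem pv_ports_agree (known live : String) :
    types_match_py known live = types_match_py_alt known live := by
  unfold types_match_py types_match_py_alt
  rcases pv_classify known with ⟨hck, hmk, hkk⟩ | ⟨gk, hck, hgk, hmk⟩ <;>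
    rcases pv_classify live with ⟨hcl, hml, hkl⟩ | ⟨gl, hcl, hgl, hml⟩
  · -- neither is an alias: both sides reduce to known == live
    rw [pvLoopA_all_false known live _ fun p hp => by rw [hmk p hp, Bool.false_and], hck, hcl]
  · -- known not an alias, live an alias of group gl
    obtain ⟨p, hp, hp1⟩ := List.mem_map.mp hgl
    rw [pvLoopA_all_false known live _ fun p hp => by rw [hmk p hp, Bool.false_and], hck, hcl]
    have hne : known ≠ live := by
      intro h; subst h
      have := hmk p hp
      rw [hml p hp, hp1] at this
      simp at this
    have hne' : known ≠ gl := by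
      intro h; subst h
      exact hkk hgl
    simp [hne, hne']
  · -- known an alias of group gk, live not an alias
    obtain ⟨p, hp, hp1⟩ := List.mem_map.mp hgk
    rw [pvLoopA_all_false known live _ fun p hp => by rw [hml p hp, Bool.and_false], hck, hcl]
    have hne : known ≠ live := by
      intro h; subst h
      have := hml p hp
      rw [hmk p hp, hp1] at this
      simp at this
    have hne' : gk ≠ live := by
      intro h; subst h
      exact hkl hgk
    simp [hne, hne']
  · -- both aliases
    by_cases hg : gk = gl
    · subst hg
      rw [pvLoopA_hit known live _ ?_, hck, hcl]
      · simp
      · obtain ⟨p, hp, hp1⟩ := List.mem_map.mp hgk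
        exact ⟨p, hp, by rw [hmk p hp, hml p hp, hp1]; simp⟩
    · obtain ⟨p, hp, hp1⟩ := List.mem_map.mp hgk
      rw [pvLoopA_all_false known live _ fun q hq => ?_, hck, hcl]
      · have hne : known ≠ live := by
          intro h; subst h
          have := hmk p hp
          rw [hml p hp, hp1] at this
          simp [hg] at this
        simp [hne, hg]
      · rw [hmk q hq, hml q hq]
        by_cases h1 : q.1 = gk <;> by_cases h2 : q.1 = gl <;> simp_all

-- ===== VERDICT (by name: the statement is the Claim_ definition above) =====
theorem types_match_py_spec : Claim_equal_types_match_py := by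
  intro known live _
  unfold Spec_types_match_py
  exact pv_ports_agree known live
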